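-- pv_equiv track=rewrite | github.com/Alcatrao/FP | extra3/replaceCharactersWithUnderscores.py | replaceCharactersWithUnderscores
-- ===== SOURCE A (Python) =====
-- def replaceCharactersWithUnderscores(s, t):
--     # Your code here...
--    if s=='':
--       return ''
--    if len(s)==1:
--       if s[0] in t:
--          return '_'
--       return s[0]
--
--    meio=len(s)//2
--    cena = replaceCharactersWithUnderscores(s[:meio], t)
--    dor = replaceCharactersWithUnderscores(s[meio:], t)
--
--    return cena+dor
-- ===== SOURCE B (Python) =====
-- def replaceCharactersWithUnderscores(s, t):
--     return ''.join('_' if c in t else c for c in s)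
-- ===== Notes on version B (the rewrite author's own statement) =====
-- stated objective: simpler
-- what changed: Replaces the divide-and-conquer halving recursion with one flat pass that joins '_' or the character for each char of s.
import Mathlib
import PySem

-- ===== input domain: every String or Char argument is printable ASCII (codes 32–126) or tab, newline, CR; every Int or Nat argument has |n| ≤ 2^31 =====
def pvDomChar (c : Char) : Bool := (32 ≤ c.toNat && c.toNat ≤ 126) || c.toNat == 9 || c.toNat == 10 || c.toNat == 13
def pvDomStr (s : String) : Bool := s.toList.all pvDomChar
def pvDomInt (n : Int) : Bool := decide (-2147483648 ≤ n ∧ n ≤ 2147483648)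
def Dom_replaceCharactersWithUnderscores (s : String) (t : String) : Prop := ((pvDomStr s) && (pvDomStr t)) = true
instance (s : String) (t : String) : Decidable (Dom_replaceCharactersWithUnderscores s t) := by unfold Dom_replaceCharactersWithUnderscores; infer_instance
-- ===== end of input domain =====

-- B replaces A's divide-and-conquer halving recursion by a single flat pass over s (objective: simpler).


-- ===== PORT A =====
def pvA (s t : List Char) : List Char :=
  if s = [] then []
  else if s.length = 1 then
    (if t.contains (s[0]!) then ['_'] else [s[0]!])
  else
    pvA (s.take (s.length / 2)) t ++ pvA (s.drop (s.length / 2)) t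
termination_by s.length
decreasing_by
  all_goals
    rename_i h0 h1
    have hs : 2 ≤ s.length := by
      cases s with
      | nil => simp at h0
      | cons a l => cases l with
        | nil => simp at h1
        | cons b m => simp
    simp only [List.length_take, List.length_drop]
    omega

-- Port of A: binary-splitting recursion on the character list, exact per Python A.
def replaceCharactersWithUnderscores (s : String) (t : String) : String :=
  String.ofList (pvA s.toList t.toList)


-- ===== PORT B =====
-- Port of B: single map over the characters of s.
def replaceCharactersWithUnderscores_alt (s : String) (t : String) : String :=
  String.ofList (s.toList.map (fun c => if t.toList.contains c then '_' else c))


-- ===== PRECONDITION & SPEC =====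
def Spec_replaceCharactersWithUnderscores (s : String) (t : String) (out : String) : Prop := out = replaceCharactersWithUnderscores_alt s t
instance (s : String) (t : String) (out : String) : Decidable (Spec_replaceCharactersWithUnderscores s t out) := by unfold Spec_replaceCharactersWithUnderscores; infer_instance

-- ===== CLAIM (what is proved, stated in full; the proofs are below) =====
def Claim_equal_replaceCharactersWithUnderscores : Prop := ∀ (s : String) (t : String), Dom_replaceCharactersWithUnderscores s t → Spec_replaceCharactersWithUnderscores s t (replaceCharactersWithUnderscores s t)

-- ===== LEMMAS AND PROOFS =====

-- ===== VERDICT (by name: the statement is the Claim_ definition above) =====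
theorem pvA_eq_map (s t : List Char) :
    pvA s t = s.map (fun c => if t.contains c then '_' else c) := by
  fun_induction pvA s t with
  | case1 => simp_all
  | case2 =>
    rename_i h h1 hc
    obtain ⟨c, rfl⟩ := List.length_eq_one_iff.mp h1
    simp only [List.getElem!_cons_zero] at hc
    simp at hc
    simp [hc]
  | case3 =>
    rename_i h h1 hc
    obtain ⟨c, rfl⟩ := List.length_eq_one_iff.mp h1
    simp only [List.getElem!_cons_zero] at hc
    simp at hc
    simp [hc]
  | case4 =>
    rename_i iht ihd
    rw [iht, ihd, ← List.map_append, List.take_append_drop]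

theorem replaceCharactersWithUnderscores_spec : Claim_equal_replaceCharactersWithUnderscores := by
  intro s t _
  unfold Spec_replaceCharactersWithUnderscores replaceCharactersWithUnderscores replaceCharactersWithUnderscores_alt
  rw [pvA_eq_map]
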